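-- pv_equiv track=rewrite | github.com/Tenebriso/Advent-of-code | 2023/3/2.py | get_number_to_left
-- ===== SOURCE A (Python) =====
-- def get_number_to_left(engine, i, j):
--     if not engine[i][j].isdigit():
--         return ""
--     number = engine[i][j]
--     length = 1
--     while j - length >= 0 and engine[i][j-length].isdigit():
--         number = engine[i][j-length] + number
--         length += 1
--     return number
-- ===== SOURCE B (Python) =====
-- def get_number_to_left(engine, i, j):
--     row = engine[i]
--     if not row[j].isdigit():
--         return ""
--     if j < 0:
--         j += len(row)
--     start = 0
--     for k in range(j):
--         if not row[k].isdigit():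
--             start = k + 1
--     return "".join(row[start:j + 1])
-- ===== Notes on version B (the rewrite author's own statement) =====
-- stated objective: alternative
-- what changed: A walks right-to-left from j prepending one cell at a time into an accumulating string; B makes a single forward scan over row[0:j] to find the last non-digit (hence the run start) and extracts the whole run with one slice and ''.join.
-- intended difference: For negative j whose wrapped position holds a digit with a digit immediately to its left, A returns only the single wrapped cell (its left-walk guard compares the original negative j against 0, so it never extends) while B normalizes the index and returns the whole digit run, the intended value under Python's negative indexing. — e.g. on get_number_to_left([["1", "2"]], 0, -1): A returns "2", B returns "12"
import Mathlib
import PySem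

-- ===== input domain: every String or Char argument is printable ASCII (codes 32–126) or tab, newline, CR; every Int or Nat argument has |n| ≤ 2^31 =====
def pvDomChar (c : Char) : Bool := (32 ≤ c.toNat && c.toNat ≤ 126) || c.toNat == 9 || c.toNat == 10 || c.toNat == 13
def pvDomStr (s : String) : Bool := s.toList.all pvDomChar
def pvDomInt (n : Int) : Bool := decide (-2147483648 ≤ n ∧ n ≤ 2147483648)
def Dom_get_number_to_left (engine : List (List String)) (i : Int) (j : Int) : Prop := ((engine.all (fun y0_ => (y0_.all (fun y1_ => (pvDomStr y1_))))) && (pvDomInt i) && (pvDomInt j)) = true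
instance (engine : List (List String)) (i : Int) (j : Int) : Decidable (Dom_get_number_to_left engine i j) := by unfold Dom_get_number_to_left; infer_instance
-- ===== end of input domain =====

-- B replaces A's right-to-left character-prepending while loop by a forward scan that locates the
-- start of the digit run, then extracts it in one slice-and-join (objective: alternative).

-- ===== PORT A =====
-- fuel only bounds the while loop (it runs at most j times); the guard itself is Python's
def pvALoop (row : List String) (j : Int) : Nat → Int → String → String
  | 0, _, number => number
  | fuel + 1, len, number =>
    if j - len ≥ 0 ∧ PySem.Str.strIsdigit ((PySem.List.pyGet? row (j - len)).getD "") = true then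
      pvALoop row j fuel (len + 1) (((PySem.List.pyGet? row (j - len)).getD "") ++ number)
    else number

def get_number_to_left (engine : List (List String)) (i : Int) (j : Int) : String :=
  let row := (PySem.List.pyGet? engine i).getD []
  if ¬ PySem.Str.strIsdigit ((PySem.List.pyGet? row j).getD "") = true then ""
  else pvALoop row j j.toNat 1 ((PySem.List.pyGet? row j).getD "")

-- ===== PORT B =====
def get_number_to_left_alt (engine : List (List String)) (i : Int) (j : Int) : String :=
  let row := (PySem.List.pyGet? engine i).getD []
  if ¬ PySem.Str.strIsdigit ((PySem.List.pyGet? row j).getD "") = true then ""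
  else
    let jn := if j < 0 then j + row.length else j
    let start := (PySem.List.pyRange 0 jn 1).foldl
      (fun acc k => if ¬ PySem.Str.strIsdigit ((PySem.List.pyGet? row k).getD "") = true then k + 1 else acc) 0
    PySem.Str.join "" (PySem.List.slice row (some start) (some (jn + 1)))

-- ===== PRECONDITION & SPEC =====
-- Pre_: exactly the inputs on which A returns (both indexings succeed); outside it A raises IndexError.
def Pre_get_number_to_left (engine : List (List String)) (i : Int) (j : Int) : Prop :=
  PySem.Raise.InRange engine.length i ∧
  PySem.Raise.InRange ((PySem.List.pyGet? engine i).getD []).length j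
instance (engine : List (List String)) (i : Int) (j : Int) : Decidable (Pre_get_number_to_left engine i j) := by unfold Pre_get_number_to_left; infer_instance

def pvWitness_get_number_to_left : List (List String) × Int × Int := ([["4", "2", "."]], 0, 1)

-- For negative j whose wrapped position holds a digit with a digit immediately to its left, A returns
-- only the single wrapped cell (its left-walk guard compares the original negative j against 0, so it
-- never extends), while B normalizes the index and returns the whole digit run — the intended value
-- under Python's negative indexing.
def D_get_number_to_left (engine : List (List String)) (i : Int) (j : Int) : Prop :=
  let r := engine.getD (i % engine.length).toNat []
  let m := (j + r.length).toNat
  j ≤ -1 ∧ 0 < m ∧ ∀ s ∈ (r.drop (m - 1)).take 2, s ≠ "" ∧ s.toList.all Char.isDigit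
instance (engine : List (List String)) (i : Int) (j : Int) : Decidable (D_get_number_to_left engine i j) := by unfold D_get_number_to_left; infer_instance

def Spec_get_number_to_left (engine : List (List String)) (i : Int) (j : Int) (out : String) : Prop := ¬ D_get_number_to_left engine i j → out = get_number_to_left_alt engine i j
instance (engine : List (List String)) (i : Int) (j : Int) (out : String) : Decidable (Spec_get_number_to_left engine i j out) := by unfold Spec_get_number_to_left; infer_instance

def pvDiffWitness_get_number_to_left : List (List String) × Int × Int := ([["1", "2"]], 0, -1)
def pvDiffWitnessOut_get_number_to_left : String × String := ("2", "12")

-- ===== CLAIM (what is proved, stated in full; the proofs are below) =====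
def Claim_unchanged_get_number_to_left : Prop := ∀ (engine : List (List String)) (i : Int) (j : Int), Dom_get_number_to_left engine i j → Pre_get_number_to_left engine i j → Spec_get_number_to_left engine i j (get_number_to_left engine i j)
def Claim_changed_get_number_to_left : Prop := Dom_get_number_to_left (pvDiffWitness_get_number_to_left.1) (pvDiffWitness_get_number_to_left.2.1) (pvDiffWitness_get_number_to_left.2.2) ∧ Pre_get_number_to_left (pvDiffWitness_get_number_to_left.1) (pvDiffWitness_get_number_to_left.2.1) (pvDiffWitness_get_number_to_left.2.2) ∧ D_get_number_to_left (pvDiffWitness_get_number_to_left.1) (pvDiffWitness_get_number_to_left.2.1) (pvDiffWitness_get_number_to_left.2.2) ∧ get_number_to_left (pvDiffWitness_get_number_to_left.1) (pvDiffWitness_get_number_to_left.2.1) (pvDiffWitness_get_number_to_left.2.2) = pvDiffWitnessOut_get_number_to_left.1 ∧ get_number_to_left_alt (pvDiffWitness_get_number_to_left.1) (pvDiffWitness_get_number_to_left.2.1) (pvDiffWitness_get_number_to_left.2.2) = pvDiffWitnessOut_get_number_to_left.2 ∧ pvDiffWitnessOut_get_number_to_left.1 ≠ pvDiffWitnessO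ut_get_number_to_left.2
def Claim_exact_get_number_to_left : Prop := ∀ (engine : List (List String)) (i : Int) (j : Int), Dom_get_number_to_left engine i j → Pre_get_number_to_left engine i j → D_get_number_to_left engine i j → get_number_to_left engine i j ≠ get_number_to_left_alt engine i j

-- ===== LEMMAS AND PROOFS =====

-- digit test at a Nat index
def pvDigitN (row : List String) (p : Nat) : Bool := PySem.Str.strIsdigit (row.getD p "")

-- the start of the maximal digit run ending just below p
def pvWalkL (row : List String) : Nat → Nat
  | 0 => 0
  | p + 1 => if pvDigitN row p then pvWalkL row p else p + 1

-- characters of "".join(row[a:b])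
def pvJoinS (row : List String) (a b : Nat) : List Char :=
  ((row.drop a).take (b - a)).flatMap String.toList

theorem pvWalkL_succ (row : List String) (p : Nat) :
    pvWalkL row (p + 1) = if pvDigitN row p then pvWalkL row p else p + 1 := rfl

theorem pvWalkL_le (row : List String) (p : Nat) : pvWalkL row p ≤ p := by
  induction p with
  | zero => simp [pvWalkL]
  | succ p ih => rw [pvWalkL_succ]; split <;> omega

theorem pvJoinS_succ (row : List String) (a p : Nat) (hap : a ≤ p) (hp : p < row.length) :
    pvJoinS row a (p + 1) = pvJoinS row a p ++ (row.getD p "").toList := by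
  unfold pvJoinS
  rw [show p + 1 - a = (p - a) + 1 by omega, List.take_add_one]
  have : (row.drop a)[p - a]? = some row[p] := by
    rw [List.getElem?_drop]
    rw [List.getElem?_eq_getElem (by omega)]
    congr 1; congr 1; omega
  simp [this, List.getD_eq_getElem?_getD, List.getElem?_eq_getElem hp]

theorem pvGetNeg (α : Type) (row : List α) (j : Int) (h1 : -(row.length : Int) ≤ j) (h2 : j < 0) :
    PySem.List.pyGet? row j = row[(j + row.length).toNat]? := by
  simp only [PySem.List.pyGet?, PySem.List.pyIdx?, if_neg (by omega : ¬ 0 ≤ j), if_pos h1]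
  simp only [Option.bind_some]
  congr 1
  omega

theorem pvDigit_ne_nil (s : String) (h : PySem.Str.strIsdigit s = true) : s.toList ≠ [] := by
  simp [PySem.Str.strIsdigit, PySem.Chars.strIsdigit] at h
  intro hnil
  apply h.1
  rw [← String.toList_inj, hnil]
  rfl

theorem pvGetNat (row : List String) (p : Nat) (hp : p < row.length) :
    PySem.List.pyGet? row (p : Int) = some (row.getD p "") := by
  rw [PySem.List.pyGet?_natCast, List.getElem?_eq_getElem hp]
  simp [List.getD_eq_getElem?_getD, List.getElem?_eq_getElem hp]

theorem pvRow_eq (engine : List (List String)) (i : Int)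
    (h : PySem.Raise.InRange engine.length i) :
    engine.getD (i % engine.length).toNat [] = (PySem.List.pyGet? engine i).getD [] := by
  obtain ⟨h1, h2⟩ := h
  by_cases hneg : i < 0
  · have he : i % (engine.length : Int) = i + engine.length := by
      rw [show i % (engine.length : Int) = (i + engine.length) % engine.length from
            (Int.add_emod_right i _).symm]
      exact Int.emod_eq_of_lt (by omega) (by omega)
    rw [he, pvGetNeg (List String) engine i h1 hneg, List.getD_eq_getElem?_getD]
  · have he : i % (engine.length : Int) = i := Int.emod_eq_of_lt (by omega) h2
    rw [he, PySem.List.pyGet?_of_nonneg engine (show (0:Int) ≤ i by omega), List.getD_eq_getElem?_getD]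

theorem pvOk_iff (s : String) :
    (s ≠ "" ∧ s.toList.all Char.isDigit) ↔ PySem.Str.strIsdigit s = true := by
  rw [show (s ≠ "") = ¬(s.toList = []) by simp [String.toList_eq_nil_iff]]
  simp [PySem.Str.strIsdigit, PySem.Chars.strIsdigit, PySem.Chars.isdigit, Char.isDigit,
        Char.le_def]

theorem pvTake2 (row : List String) (p : Nat) (h : p + 1 < row.length) :
    (row.drop p).take 2 = [row.getD p "", row.getD (p + 1) ""] := by
  rw [List.drop_eq_getElem_cons (show p < row.length by omega), List.drop_eq_getElem_cons h,
      List.getD_eq_getElem?_getD, List.getD_eq_getElem?_getD,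
      List.getElem?_eq_getElem h, List.getElem?_eq_getElem (show p < row.length by omega)]
  rfl

theorem pvALoop_eq (row : List String) (n : Nat) (hn : n < row.length) :
    ∀ p, p ≤ n → ∀ acc : String,
      (pvALoop row (n : Int) p ((n : Int) + 1 - (p : Int)) acc).toList
        = pvJoinS row (pvWalkL row p) p ++ acc.toList := by
  intro p
  induction p with
  | zero =>
    intro _ acc
    simp [pvALoop, pvWalkL, pvJoinS]
  | succ p ih =>
    intro hpn acc
    rw [show pvALoop row (n:Int) (p+1) ((n:Int)+1-((p+1:Nat):Int)) acc
        = if (n:Int) - ((n:Int)+1-((p+1:Nat):Int)) ≥ 0 ∧ PySem.Str.strIsdigit ((PySem.List.pyGet? row ((n:Int) - ((n:Int)+1-((p+1:Nat):Int)))).getD "") = true then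
            pvALoop row (n:Int) p (((n:Int)+1-((p+1:Nat):Int)) + 1) (((PySem.List.pyGet? row ((n:Int) - ((n:Int)+1-((p+1:Nat):Int)))).getD "") ++ acc)
          else acc from rfl]
    have hidx : (n:Int) - ((n:Int)+1-((p+1:Nat):Int)) = (p : Int) := by push_cast; ring
    rw [hidx, pvGetNat row p (by omega)]
    simp only [Option.getD_some]
    rw [pvWalkL_succ]
    by_cases hd : pvDigitN row p = true
    · have hd' : PySem.Str.strIsdigit (row.getD p "") = true := hd
      rw [if_pos ⟨by omega, hd'⟩, if_pos hd]
      have harg : ((n:Int)+1-((p+1:Nat):Int)) + 1 = (n:Int)+1-(p:Int) := by push_cast; ring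
      rw [harg, ih (by omega)]
      rw [String.toList_append, ← List.append_assoc,
          ← pvJoinS_succ row (pvWalkL row p) p (pvWalkL_le row p) (by omega)]
    · have hd' : ¬ PySem.Str.strIsdigit (row.getD p "") = true := hd
      rw [if_neg (by simp only [not_and]; intro _; exact hd'), if_neg hd]
      simp [pvJoinS]

theorem pvFold_eq_walk (row : List String) (p : Nat) :
    (PySem.List.pyRange 0 (p : Int) 1).foldl
      (fun acc k => if ¬ PySem.Str.strIsdigit ((PySem.List.pyGet? row k).getD "") = true then k + 1 else acc) 0
      = (pvWalkL row p : Int) := by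
  induction p with
  | zero => simp [PySem.List.pyRange_one_eq_nil, pvWalkL]
  | succ p ih =>
    rw [show ((p+1:Nat) : Int) = (p : Int) + 1 by push_cast; ring,
        PySem.List.pyRange_one_succ_right (by positivity)]
    rw [List.foldl_append, ih]
    simp only [List.foldl_cons, List.foldl_nil, PySem.List.pyGet?_natCast]
    rw [pvWalkL_succ]
    unfold pvDigitN
    rcases h : PySem.Str.strIsdigit (row.getD p "") with _ | _ <;>
      simp_all [List.getD_eq_getElem?_getD, PySem.Str.strIsdigit]

theorem pvIntercalate_nil (l : List (List Char)) : List.intercalate [] l = l.flatten := by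
  induction l with
  | nil => simp [List.intercalate]
  | cons x xs ih =>
    cases xs with
    | nil => simp [List.intercalate]
    | cons y ys =>
      simp only [List.intercalate, List.intersperse] at *
      simp_all

theorem pvJoin_toList (parts : List String) :
    (PySem.Str.join "" parts).toList = parts.flatMap String.toList := by
  simp [PySem.Str.join, PySem.Chars.join, pvIntercalate_nil, List.flatten_eq_flatMap, List.flatMap_map]

-- B's value, in characters, once the digit test at j has passed and jn is the normalized index
theorem pvB_toList (row : List String) (w : Nat) (m : Nat) :
    (PySem.Str.join "" (PySem.List.slice row (some (w : Int)) (some ((m : Int) + 1)))).toList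
      = pvJoinS row w (m + 1) := by
  rw [show ((m:Int) + 1) = ((m+1 : Nat) : Int) by push_cast; ring,
      PySem.List.slice_natCast, pvJoin_toList]
  rfl

theorem get_number_to_left_eq_of_not_D (engine : List (List String)) (i : Int) (j : Int)
    (hpre : Pre_get_number_to_left engine i j) (hnD : ¬ D_get_number_to_left engine i j) :
    get_number_to_left engine i j = get_number_to_left_alt engine i j := by
  obtain ⟨hi, hj⟩ := hpre
  unfold PySem.Raise.InRange at hj
  simp only [get_number_to_left, get_number_to_left_alt]
  set row := (PySem.List.pyGet? engine i).getD [] with hrow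
  have hRE : engine.getD (i % engine.length).toNat [] = row := (pvRow_eq engine i hi).trans hrow.symm
  simp only [D_get_number_to_left, hRE] at hnD
  by_cases hc : PySem.Str.strIsdigit ((PySem.List.pyGet? row j).getD "") = true
  · rw [if_neg (by simpa using hc), if_neg (by simpa using hc)]
    by_cases hj0 : 0 ≤ j
    · -- j ≥ 0 : the main equivalence
      have hjn : j = ((j.toNat : Nat) : Int) := by omega
      set n := j.toNat with hn
      have hnL : n < row.length := by omega
      rw [hjn]
      simp only [if_neg (by omega : ¬ ((n:Nat) : Int) < 0)]
      rw [← String.toList_inj]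
      have hA : ∀ acc : String, (pvALoop row ((n:Nat) : Int) n 1 acc).toList
          = pvJoinS row (pvWalkL row n) n ++ acc.toList := by
        intro acc
        have h := pvALoop_eq row n hnL n le_rfl acc
        rwa [show ((n:Nat) : Int) + 1 - ((n:Nat) : Int) = 1 by ring] at h
      rw [hA, pvFold_eq_walk row n, pvB_toList row _ n]
      rw [pvJoinS_succ row (pvWalkL row n) n (pvWalkL_le row n) hnL]
      rw [pvGetNat row n hnL]
      rfl
    · -- j < 0 : A keeps the single wrapped cell; ¬D_ makes B do the same
      have hL : -(row.length : Int) ≤ j := hj.1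
      set m := (j + row.length).toNat with hm
      have hmL : m < row.length := by omega
      have hgj : PySem.List.pyGet? row j = row[m]? := pvGetNeg String row j hL (by omega)
      have hcell : (PySem.List.pyGet? row j).getD "" = row.getD m "" := by
        rw [hgj, List.getD_eq_getElem?_getD]
      have hfuel : j.toNat = 0 := by omega
      have hjlt : j < 0 := by omega
      rw [hfuel]
      simp only [pvALoop, if_pos hjlt]
      have hjm : j + (row.length : Int) = ((m:Nat) : Int) := by omega
      rw [hjm, pvFold_eq_walk row m]
      have hwm : pvWalkL row m = m := by
        rcases Nat.eq_zero_or_pos m with h0 | h1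
        · rw [h0]; rfl
        · obtain ⟨m', hm'⟩ : ∃ m', m = m' + 1 := ⟨m - 1, by omega⟩
          rw [hm', pvWalkL_succ, if_neg ?_]
          intro hd
          apply hnD
          refine ⟨by omega, by omega, ?_⟩
          rw [show m - 1 = m' by omega, pvTake2 row m' (by omega),
              show m' + 1 = m from hm'.symm]
          intro s hs
          rcases List.mem_pair.mp hs with hseq | hseq <;> subst hseq
          · exact (pvOk_iff _).mpr hd
          · exact (pvOk_iff _).mpr (hcell ▸ hc)
      rw [hwm, ← String.toList_inj, pvB_toList row m m,
          pvJoinS_succ row m m le_rfl hmL, hcell]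
      simp [pvJoinS]
  · rw [if_pos hc, if_pos hc]

-- ===== VERDICT (by name: the statement is the Claim_ definition above) =====
theorem get_number_to_left_spec : Claim_unchanged_get_number_to_left := by
  intro engine i j _ hpre hnD
  exact get_number_to_left_eq_of_not_D engine i j hpre hnD

theorem get_number_to_left_changed : Claim_changed_get_number_to_left := by
  unfold Claim_changed_get_number_to_left; decide

theorem get_number_to_left_tight : Claim_exact_get_number_to_left := by
  intro engine i j _ hpre hD
  obtain ⟨hi, hj⟩ := hpre
  unfold PySem.Raise.InRange at hj
  simp only [get_number_to_left, get_number_to_left_alt]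
  set row := (PySem.List.pyGet? engine i).getD [] with hrow
  have hRE : engine.getD (i % engine.length).toNat [] = row := (pvRow_eq engine i hi).trans hrow.symm
  simp only [D_get_number_to_left, hRE] at hD
  obtain ⟨hjle, hm0, hall⟩ := hD
  have hjlt : j < 0 := by omega
  set m := (j + row.length).toNat with hm
  have hmL : m < row.length := by omega
  have hm1 : 1 ≤ m := hm0
  obtain ⟨m', hm'⟩ : ∃ m', m = m' + 1 := ⟨m - 1, by omega⟩
  have hgj : PySem.List.pyGet? row j = row[m]? := pvGetNeg String row j hj.1 hjlt
  have hcell : (PySem.List.pyGet? row j).getD "" = row.getD m "" := by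
    rw [hgj, List.getD_eq_getElem?_getD]
  rw [show m - 1 = m' by omega, pvTake2 row m' (by omega),
      show m' + 1 = m from hm'.symm] at hall
  have hc : PySem.Str.strIsdigit ((PySem.List.pyGet? row j).getD "") = true := by
    rw [hcell]
    exact (pvOk_iff _).mp (hall (row.getD m "") (by simp))
  rw [if_neg (by simpa using hc), if_neg (by simpa using hc)]
  have hd' : PySem.Str.strIsdigit (row.getD m' "") = true :=
    (pvOk_iff _).mp (hall (row.getD m' "") (by simp))
  have hfuel : j.toNat = 0 := by omega
  rw [hfuel]
  simp only [pvALoop, if_pos hjlt]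
  rw [show j + (row.length : Int) = ((m : Nat) : Int) by omega, pvFold_eq_walk row m]
  intro heq
  have hlist := congrArg String.toList heq
  rw [hcell, pvB_toList row (pvWalkL row m) m] at hlist
  have hwle : pvWalkL row m ≤ m' := by
    rw [hm', pvWalkL_succ, if_pos (show pvDigitN row m' = true from hd')]
    exact pvWalkL_le row m'
  rw [hm'] at hlist hwle hmL
  rw [pvJoinS_succ row (pvWalkL row (m' + 1)) (m' + 1) (by omega) hmL,
      pvJoinS_succ row (pvWalkL row (m' + 1)) m' (by omega) (by omega)] at hlist
  have hne := pvDigit_ne_nil (row.getD m' "") hd'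
  have hlen := congrArg List.length hlist
  simp only [List.length_append] at hlen
  have : (row.getD m' "").toList.length ≠ 0 := by
    intro h0; exact hne (List.eq_nil_of_length_eq_zero h0)
  omega
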